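-- pv_equiv track=rewrite | github.com/MrBrantCode/unitest_baseline | mut_generate/mist_train_cf/cf_88675/solution.py | sum_of_cubes_of_primes
-- ===== SOURCE A (Python) =====
-- import math
--
-- def sum_of_cubes_of_primes(n):
--     primes = [True] * (n + 1)
--     primes[0] = primes[1] = False
--
--     for i in range(2, math.isqrt(n) + 1):
--         if primes[i]:
--             for j in range(i * i, n + 1, i):
--                 primes[j] = False
--
--     sum_of_cubes = 0
--     for i in range(n + 1):
--         if primes[i]:
--             sum_of_cubes += i**3
--
--     return sum_of_cubes
-- ===== SOURCE B (Python) =====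
-- import math
--
-- def sum_of_cubes_of_primes(n):
--     total = 0
--     for i in range(2, n + 1):
--         if all(i % d for d in range(2, math.isqrt(i) + 1)):
--             total += i ** 3
--     return total
-- ===== Notes on version B (the rewrite author's own statement) =====
-- stated objective: simpler
-- what changed: Replaced the boolean Eratosthenes sieve (table building plus a second summing pass) by a single pass with per-number trial division up to isqrt(i), accumulating i**3 directly.
import Mathlib
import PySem

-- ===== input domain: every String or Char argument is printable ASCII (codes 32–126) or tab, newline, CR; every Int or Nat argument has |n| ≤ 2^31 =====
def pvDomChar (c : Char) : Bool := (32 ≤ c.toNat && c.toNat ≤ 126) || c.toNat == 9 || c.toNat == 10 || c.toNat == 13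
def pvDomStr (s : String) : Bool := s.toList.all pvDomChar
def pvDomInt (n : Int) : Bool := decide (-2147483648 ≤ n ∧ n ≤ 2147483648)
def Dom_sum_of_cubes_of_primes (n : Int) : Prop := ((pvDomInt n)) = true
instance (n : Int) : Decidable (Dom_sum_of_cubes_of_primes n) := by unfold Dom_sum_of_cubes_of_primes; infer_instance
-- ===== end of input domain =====

-- B replaces A's Eratosthenes sieve (boolean table + summing pass) by a single pass with
-- per-number trial division, for simplicity; same return value for every n ≥ 1.

-- ===== PORT A =====
-- inner loop 'for j in range(i*i, n+1, i): primes[j] = False' for step s > 0;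
-- fuel = b - j suffices since j grows by s ≥ 1 each step (exact for Python's positive-step range).
def pvMarkAux : Nat → Nat → Nat → Nat → List Bool → List Bool
  | 0, _, _, _, ps => ps
  | fuel + 1, j, b, s, ps => if j < b then pvMarkAux fuel (j + s) b s (ps.set j false) else ps

def pvMark (ps : List Bool) (i : Nat) (n : Nat) : List Bool :=
  pvMarkAux (n + 1 - i * i) (i * i) (n + 1) i ps

-- outer-loop body: 'if primes[i]: <mark the multiples of i>'
def pvStep (m : Nat) (ps : List Bool) (i : Nat) : List Bool :=
  if ps.getD i false then pvMark ps i m else ps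

-- Pre_ gives n ≥ 1, so n.toNat = n, the writes primes[0] = primes[1] = False are in range and
-- every primes[i] read below is in range: Nat indexing with set/getD is exact for Python here.
def sum_of_cubes_of_primes (n : Int) : Int :=
  let m := n.toNat
  let primes := ((List.replicate (m + 1) true).set 0 false).set 1 false
  let primes := (List.range' 2 (Nat.sqrt m + 1 - 2)).foldl (pvStep m) primes
  (List.range (m + 1)).foldl (fun s i => if primes.getD i false then s + (i : Int) ^ 3 else s) 0

-- ===== PORT B =====
-- 'all(i % d for d in range(2, isqrt(i) + 1))'
def pvTrial (i : Nat) : Bool :=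
  (List.range' 2 (Nat.sqrt i + 1 - 2)).all (fun d => i % d != 0)

def sum_of_cubes_of_primes_alt (n : Int) : Int :=
  (List.range' 2 (n.toNat + 1 - 2)).foldl
    (fun total i => if pvTrial i then total + (i : Int) ^ 3 else total) 0

-- ===== PRECONDITION & SPEC =====
-- Pre_ excludes n ≤ 0, where A raises IndexError (primes[0]/primes[1] writes into a list of length ≤ 1).
def Pre_sum_of_cubes_of_primes (n : Int) : Prop := 1 ≤ n
instance (n : Int) : Decidable (Pre_sum_of_cubes_of_primes n) := by
  unfold Pre_sum_of_cubes_of_primes; infer_instance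
def pvWitness_sum_of_cubes_of_primes : Int := 10

def Spec_sum_of_cubes_of_primes (n : Int) (out : Int) : Prop := out = sum_of_cubes_of_primes_alt n
instance (n : Int) (out : Int) : Decidable (Spec_sum_of_cubes_of_primes n out) := by
  unfold Spec_sum_of_cubes_of_primes; infer_instance

-- ===== CLAIM (what is proved, stated in full; the proofs are below) =====
def Claim_equal_sum_of_cubes_of_primes : Prop := ∀ (n : Int), Dom_sum_of_cubes_of_primes n → Pre_sum_of_cubes_of_primes n → Spec_sum_of_cubes_of_primes n (sum_of_cubes_of_primes n)

-- ===== LEMMAS AND PROOFS =====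

-- "x has no divisor d with 2 ≤ d and d*d ≤ x" (the trial-division test)
def pvND (x : Nat) : Prop := ∀ d, 2 ≤ d → d * d ≤ x → ¬ d ∣ x

-- state of the sieve after processing i = 2 .. t-1
abbrev pvCond (m t x : Nat) : Prop :=
  2 ≤ x ∧ x ≤ m ∧ ∀ d, d < t → 2 ≤ d → d * d ≤ x → ¬ d ∣ x

theorem getD_set_false (ps : List Bool) (j x : Nat) :
    (ps.set j false).getD x false = if x = j then false else ps.getD x false := by
  simp only [List.getD_eq_getElem?_getD, List.getElem?_set]
  by_cases h : x = j
  · subst h; by_cases hl : x < ps.length <;> simp [hl]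
  · simp [h, Ne.symm h]

theorem pvMarkAux_getD (fuel : Nat) : ∀ (j b s : Nat) (ps : List Bool) (x : Nat),
    1 ≤ s → b - j ≤ fuel →
    (pvMarkAux fuel j b s ps).getD x false =
      if s ∣ (x - j) ∧ j ≤ x ∧ x < b then false else ps.getD x false := by
  induction fuel with
  | zero =>
    intro j b s ps x hs hf
    simp only [pvMarkAux]
    rw [if_neg]; rintro ⟨-, h1, h2⟩; omega
  | succ fuel ih =>
    intro j b s ps x hs hf
    simp only [pvMarkAux]
    by_cases hjb : j < b
    · rw [if_pos hjb, ih (j + s) b s _ x hs (by omega), getD_set_false]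
      by_cases hxj : x = j
      · subst hxj
        rw [if_neg (by rintro ⟨-, h, -⟩; omega), if_pos rfl, if_pos ⟨by simp, le_rfl, hjb⟩]
      · rw [if_neg hxj]
        have hiff : (s ∣ x - (j + s) ∧ j + s ≤ x ∧ x < b) ↔ (s ∣ x - j ∧ j ≤ x ∧ x < b) := by
          constructor
          · rintro ⟨hd, h1, h2⟩
            refine ⟨?_, by omega, h2⟩
            have hx : x - j = (x - (j + s)) + s := by omega
            rw [hx]; exact Nat.dvd_add hd dvd_rfl
          · rintro ⟨hd, h1, h2⟩
            have hpos : 0 < x - j := by omega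
            have hge : s ≤ x - j := Nat.le_of_dvd hpos hd
            refine ⟨?_, by omega, h2⟩
            have hx : x - (j + s) = (x - j) - s := by omega
            rw [hx]; exact Nat.dvd_sub hd dvd_rfl
        rw [if_congr hiff rfl rfl]
    · rw [if_neg hjb, if_neg (by rintro ⟨-, h1, h2⟩; omega)]

theorem pvMark_getD (ps : List Bool) (i m x : Nat) (hi : 1 ≤ i) :
    (pvMark ps i m).getD x false =
      if i ∣ x ∧ i * i ≤ x ∧ x < m + 1 then false else ps.getD x false := by
  rw [pvMark, pvMarkAux_getD (m + 1 - i * i) (i * i) (m + 1) i ps x hi (le_refl _)]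
  refine if_congr ?_ rfl rfl
  constructor
  · rintro ⟨hd, h1, h2⟩
    refine ⟨?_, h1, h2⟩
    have hx : x = (x - i * i) + i * i := by omega
    rw [hx]; exact Nat.dvd_add hd (Dvd.intro i rfl)
  · rintro ⟨hd, h1, h2⟩
    exact ⟨Nat.dvd_sub hd (Dvd.intro i rfl), h1, h2⟩

theorem init_getD (m x : Nat) :
    (((List.replicate (m + 1) true).set 0 false).set 1 false).getD x false
      = decide (2 ≤ x ∧ x ≤ m) := by
  rw [getD_set_false, getD_set_false]
  rcases x with _ | _ | x
  · simp
  · simp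
  · simp only [List.getD_eq_getElem?_getD, List.getElem?_replicate]
    by_cases h : x + 2 < m + 1
    · rw [if_pos h]; simp; omega
    · rw [if_neg h]; simp; omega

theorem sieve_inv (m : Nat) : ∀ (k : Nat), 2 + k ≤ Nat.sqrt m + 1 → ∀ x,
    ((List.range' 2 k).foldl (pvStep m)
        (((List.replicate (m + 1) true).set 0 false).set 1 false)).getD x false
      = decide (pvCond m (2 + k) x) := by
  intro k
  induction k with
  | zero =>
    intro _ x
    rw [List.range'_zero, List.foldl_nil, init_getD]
    simp only [pvCond, decide_eq_decide]
    constructor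
    · rintro ⟨h1, h2⟩; exact ⟨h1, h2, by intro d hd; omega⟩
    · rintro ⟨h1, h2, -⟩; exact ⟨h1, h2⟩
  | succ k ih =>
    intro hk x
    have hk' : 2 + k ≤ Nat.sqrt m + 1 := by omega
    have him : 2 + k ≤ m := le_trans (by omega) (Nat.sqrt_le_self m)
    rw [List.range'_concat, List.foldl_append, List.foldl_cons, List.foldl_nil]
    simp only [one_mul]
    set i := 2 + k with hi
    rw [pvStep, ih hk' i]
    by_cases hpi : pvCond m i i
    · -- primes[i] is true: mark the multiples of i
      rw [if_pos (decide_eq_true hpi), pvMark_getD _ _ _ _ (by omega), ih hk' x]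
      by_cases hmark : i ∣ x ∧ i * i ≤ x ∧ x < m + 1
      · rw [if_pos hmark]
        have : ¬ pvCond m (2 + (k + 1)) x := by
          rintro ⟨-, -, hall⟩
          exact hall i (by omega) (by omega) hmark.2.1 hmark.1
        simp [this]
      · rw [if_neg hmark]
        simp only [decide_eq_decide, pvCond]
        constructor
        · rintro ⟨h1, h2, hall⟩
          refine ⟨h1, h2, fun d hd h2d hdd hdvd => ?_⟩
          by_cases hdi : d = i
          · subst hdi; exact hmark ⟨hdvd, hdd, by omega⟩
          · exact hall d (by omega) h2d hdd hdvd
        · rintro ⟨h1, h2, hall⟩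
          exact ⟨h1, h2, fun d hd h2d hdd hdvd => hall d (by omega) h2d hdd hdvd⟩
    · -- primes[i] is false: i has a smaller divisor, so nothing new needs marking
      rw [if_neg (fun hc => hpi (of_decide_eq_true hc)), ih hk' x]
      simp only [decide_eq_decide, pvCond]
      have hex : ∃ d, d < i ∧ 2 ≤ d ∧ d * d ≤ i ∧ d ∣ i := by
        by_contra hno
        push Not at hno
        exact hpi ⟨by omega, him, fun d hd h2d hdd hdvd => hno d hd h2d hdd hdvd⟩
      obtain ⟨e, he1, he2, he3, he4⟩ := hex
      constructor
      · rintro ⟨h1, h2, hall⟩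
        refine ⟨h1, h2, fun d hd h2d hdd hdvd => ?_⟩
        by_cases hdi : d = i
        · subst hdi
          refine hall e (by omega) he2 ?_ (he4.trans hdvd)
          calc e * e ≤ i := he3
            _ ≤ i * i := Nat.le_mul_of_pos_left i (by omega)
            _ ≤ x := hdd
        · exact hall d (by omega) h2d hdd hdvd
      · rintro ⟨h1, h2, hall⟩
        exact ⟨h1, h2, fun d hd h2d hdd hdvd => hall d (by omega) h2d hdd hdvd⟩

theorem trial_iff (i : Nat) : pvTrial i = true ↔ pvND i := by
  simp only [pvTrial, pvND, List.all_eq_true, List.mem_range'_1, bne_iff_ne, ne_eq,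
    ← Nat.dvd_iff_mod_eq_zero]
  constructor
  · intro h d h2d hdd
    have hds : d ≤ Nat.sqrt i := Nat.le_sqrt.mpr hdd
    have : Nat.sqrt i ≥ 2 := by omega
    exact h d ⟨h2d, by omega⟩
  · rintro h d ⟨h2d, hdlt⟩
    refine h d h2d (Nat.le_sqrt.mp (by omega))

theorem main_eq (n : Int) (hpre : 1 ≤ n) :
    sum_of_cubes_of_primes n = sum_of_cubes_of_primes_alt n := by
  have hm : 1 ≤ n.toNat := by omega
  simp only [sum_of_cubes_of_primes, sum_of_cubes_of_primes_alt]
  set m := n.toNat with hmdef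
  have hs1 : 1 ≤ Nat.sqrt m := Nat.sqrt_pos.mpr (by omega)
  have hflag : ∀ x,
      ((List.range' 2 (Nat.sqrt m + 1 - 2)).foldl (pvStep m)
          (((List.replicate (m + 1) true).set 0 false).set 1 false)).getD x false
        = decide (pvCond m (Nat.sqrt m + 1) x) := by
    intro x
    have h := sieve_inv m (Nat.sqrt m + 1 - 2) (by omega) x
    rwa [show 2 + (Nat.sqrt m + 1 - 2) = Nat.sqrt m + 1 by omega] at h
  have step1 :
      (List.range (m + 1)).foldl
        (fun s i => if ((List.range' 2 (Nat.sqrt m + 1 - 2)).foldl (pvStep m)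
            (((List.replicate (m + 1) true).set 0 false).set 1 false)).getD i false
          then s + (i : Int) ^ 3 else s) 0
      = (List.range (m + 1)).foldl
        (fun s i => if pvCond m (Nat.sqrt m + 1) i then s + (i : Int) ^ 3 else s) 0 := by
    refine PySem.List.foldl_congr_mem _ _ _ _ ?_
    intro acc x _
    rw [hflag x]
    by_cases h : pvCond m (Nat.sqrt m + 1) x
    · rw [if_pos (decide_eq_true h), if_pos h]
    · rw [if_neg (fun hc => h (of_decide_eq_true hc)), if_neg h]
  rw [step1, show m + 1 - 2 = m - 1 by omega]
  -- peel off indices 0 and 1, whose flags are false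
  rw [List.range_eq_range', show m + 1 = ((m - 1) + 1) + 1 by omega,
      List.range'_succ, List.range'_succ, List.foldl_cons, List.foldl_cons]
  simp only [show (0:Nat) + 1 = 1 by rfl, show (1:Nat) + 1 = 2 by rfl]
  rw [if_neg (by simp [pvCond]), if_neg (by simp [pvCond])]
  -- the two folds agree elementwise on range' 2 (m - 1)
  refine PySem.List.foldl_congr_mem _ _ _ _ ?_
  intro acc x hx
  rw [List.mem_range'_1] at hx
  have hxm : x ≤ m := by omega
  have hcnd : pvCond m (Nat.sqrt m + 1) x ↔ pvTrial x = true := by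
    constructor
    · rintro ⟨-, -, hall⟩
      exact (trial_iff x).mpr (fun d h2d hdd =>
        hall d (by have := Nat.le_sqrt.mpr (le_trans hdd hxm); omega) h2d hdd)
    · intro ht
      exact ⟨by omega, hxm, fun d _ h2d hdd => (trial_iff x).mp ht d h2d hdd⟩
  by_cases ht : pvTrial x = true <;> simp [ht, hcnd]

-- ===== VERDICT (by name: the statement is the Claim_ definition above) =====
theorem sum_of_cubes_of_primes_spec : Claim_equal_sum_of_cubes_of_primes := by
  intro n _ hpre
  unfold Spec_sum_of_cubes_of_primes
  exact main_eq n hpre
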